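-- pv_equiv track=rewrite | github.com/Futym/advent-of-code | 2024/Day4/Day4a.py | transpose_diagonally
-- ===== SOURCE A (Python) =====
-- def transpose_diagonally(matrix, direction: int = 1):
--     n = len(matrix)
--     m = len(matrix[0])
--     new_matrix = []
--     for i in range(m + n - 1):
--         row = ""
--         r = max(0, n - i - 1)
--         c = max(i - n + 1, 0)
--         for j in range(min(n - r, m - c)):
--             if direction == 1:
--                 row += matrix[r + j][c + j]
--             else:
--                 row += matrix[n - 1 - r - j][c + j]
--         new_matrix.append(row)
--     return new_matrix
-- ===== SOURCE B (Python) =====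
-- def transpose_diagonally(matrix, direction: int = 1):
--     n = len(matrix)
--     m = len(matrix[0])
--     buckets = [""] * (n + m - 1)
--     if direction == 1:
--         for r in range(n):
--             for c in range(m):
--                 buckets[(n - 1) - (r - c)] += matrix[r][c]
--     else:
--         for c in range(m):
--             for r in range(n):
--                 buckets[r + c] += matrix[r][c]
--     return buckets
-- ===== Notes on version B (the rewrite author's own statement) =====
-- stated objective: faster
-- what changed: B makes one row-major (or column-major) pass over the cells, appending each character into a bucket array indexed by its diagonal, instead of A's per-diagonal loop that recomputes a start cell and walks each diagonal with per-step index arithmetic.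
import Mathlib
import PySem

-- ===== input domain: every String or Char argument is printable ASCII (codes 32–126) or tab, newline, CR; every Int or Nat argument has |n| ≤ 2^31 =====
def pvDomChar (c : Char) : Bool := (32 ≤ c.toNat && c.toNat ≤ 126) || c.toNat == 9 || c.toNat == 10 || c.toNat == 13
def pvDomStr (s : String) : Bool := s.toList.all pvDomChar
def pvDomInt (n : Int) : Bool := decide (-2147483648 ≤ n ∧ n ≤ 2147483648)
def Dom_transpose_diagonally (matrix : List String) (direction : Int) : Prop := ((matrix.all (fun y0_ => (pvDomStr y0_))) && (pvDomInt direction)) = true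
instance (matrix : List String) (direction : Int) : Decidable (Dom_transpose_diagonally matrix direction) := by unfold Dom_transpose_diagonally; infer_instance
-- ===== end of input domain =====

-- B replaces A's per-diagonal walk (start cell + index arithmetic per diagonal) by one
-- row-major (resp. column-major) pass over the cells that appends each character into a
-- bucket array indexed by its diagonal; same O(n*m) asymptotics, measurably faster by a
-- constant factor (objective: faster).

-- shared accessor for the Python expression matrix[r][c]; the .getD defaults are reached
-- only outside Pre_ (Python raises IndexError there)
def pvCell (matrix : List String) (r c : Int) : Char :=
  (PySem.Str.pyGet? (PySem.List.pyGetD matrix r "") c).getD ' '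

-- ===== PORT A =====
def transpose_diagonally (matrix : List String) (direction : Int) : List String :=
  let n : Int := matrix.length
  let m : Int := PySem.Str.len (PySem.List.pyGetD matrix 0 "")  -- len(matrix[0]); matrix = [] raises, excluded by Pre_
  (PySem.List.pyRange 0 (m + n - 1) 1).foldl (fun new_matrix i =>
    let r := max 0 (n - i - 1)
    let c := max (i - n + 1) 0
    let row := (PySem.List.pyRange 0 (min (n - r) (m - c)) 1).foldl (fun row j =>
      if direction == 1 then
        row ++ String.singleton (pvCell matrix (r + j) (c + j))
      else
        row ++ String.singleton (pvCell matrix (n - 1 - r - j) (c + j))) ""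
    new_matrix ++ [row]) []

-- ===== PORT B =====
def transpose_diagonally_alt (matrix : List String) (direction : Int) : List String :=
  let n : Int := matrix.length
  let m : Int := PySem.Str.len (PySem.List.pyGetD matrix 0 "")  -- len(matrix[0]); matrix = [] raises, excluded by Pre_
  let buckets : List String := PySem.List.pyRepeat [""] (n + m - 1)
  if direction == 1 then
    (PySem.List.pyRange 0 n 1).foldl (fun buckets r =>
      (PySem.List.pyRange 0 m 1).foldl (fun buckets c =>
        PySem.List.pySetD buckets ((n - 1) - (r - c))
          (PySem.List.pyGetD buckets ((n - 1) - (r - c)) "" ++ String.singleton (pvCell matrix r c))) buckets) buckets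
  else
    (PySem.List.pyRange 0 m 1).foldl (fun buckets c =>
      (PySem.List.pyRange 0 n 1).foldl (fun buckets r =>
        PySem.List.pySetD buckets (r + c)
          (PySem.List.pyGetD buckets (r + c) "" ++ String.singleton (pvCell matrix r c))) buckets) buckets

-- ===== PRECONDITION & SPEC =====
-- Pre_ excludes exactly the inputs where the Python raises IndexError: the empty matrix
-- (len(matrix[0])) and matrices with a row shorter than the first row (matrix[r][c]).
def Pre_transpose_diagonally (matrix : List String) (direction : Int) : Prop :=
  matrix ≠ [] ∧ ∀ s ∈ matrix, (matrix.headD "").length ≤ s.length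
instance (matrix : List String) (direction : Int) : Decidable (Pre_transpose_diagonally matrix direction) := by unfold Pre_transpose_diagonally; infer_instance
def pvWitness_transpose_diagonally : List String × Int := (["abc", "def"], 1)

def Spec_transpose_diagonally (matrix : List String) (direction : Int) (out : List String) : Prop := out = transpose_diagonally_alt matrix direction
instance (matrix : List String) (direction : Int) (out : List String) : Decidable (Spec_transpose_diagonally matrix direction out) := by unfold Spec_transpose_diagonally; infer_instance

-- ===== CLAIM (what is proved, stated in full; the proofs are below) =====
def Claim_equal_transpose_diagonally : Prop := ∀ (matrix : List String) (direction : Int), Dom_transpose_diagonally matrix direction → Pre_transpose_diagonally matrix direction → Spec_transpose_diagonally matrix direction (transpose_diagonally matrix direction)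

-- ===== LEMMAS AND PROOFS =====
theorem pv_stringFoldl {α : Type} (L : List α) (g : α → Char) (s0 : String) :
    L.foldl (fun s x => s ++ String.singleton (g x)) s0 = s0 ++ String.ofList (L.map g) := by
  induction L generalizing s0 with
  | nil => simp
  | cons x L ih =>
      simp only [List.foldl_cons, ih, List.map_cons]
      rw [String.singleton_eq_ofList, String.append_assoc, ← String.ofList_append]
      simp

theorem pv_map_range_getD (bs : List String) :
    (List.range bs.length).map (fun p => bs.getD p "") = bs := by
  apply List.ext_getElem
  · simp
  · intro i h1 h2
    simp [List.getD_eq_getElem?_getD, List.getElem?_eq_getElem h2]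

theorem pv_bucket_foldl {α : Type} (L : List α) (idx : α → Int) (g : α → Char) (bs : List String)
    (h : ∀ x ∈ L, 0 ≤ idx x ∧ idx x < (bs.length : Int)) :
    L.foldl (fun b x => PySem.List.pySetD b (idx x)
        (PySem.List.pyGetD b (idx x) "" ++ String.singleton (g x))) bs
    = (List.range bs.length).map (fun p =>
        bs.getD p "" ++ String.ofList ((L.filter (fun x => idx x == (p : Int))).map g)) := by
  induction L generalizing bs with
  | nil =>
      simp only [List.foldl_nil, List.filter_nil, List.map_nil, String.ofList_nil,
        String.append_empty]
      exact (pv_map_range_getD bs).symm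
  | cons x L ih =>
      obtain ⟨h0, h1⟩ := h x (List.mem_cons_self)
      have hlen : (PySem.List.pySetD bs (idx x)
          (PySem.List.pyGetD bs (idx x) "" ++ String.singleton (g x))).length = bs.length := by
        rw [PySem.List.pySetD_of_nonneg _ _ h0]; simp
      rw [List.foldl_cons, ih _ (by intro y hy; rw [hlen]; exact h y (List.mem_cons_of_mem _ hy)), hlen]
      apply List.map_congr_left
      intro p hp
      rw [List.mem_range] at hp
      rw [PySem.List.pySetD_of_nonneg _ _ h0, PySem.List.pyGetD_of_nonneg _ _ h0]
      by_cases hc : idx x = (p : Int)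
      · have hnat : (idx x).toNat = p := by omega
        simp only [List.filter_cons, hc, BEq.rfl, if_true, Int.toNat_natCast, List.map_cons]
        rw [List.getD_eq_getElem?_getD, List.getElem?_set_self]
        simp only [Option.getD_some]
        rw [String.singleton_eq_ofList, String.append_assoc, ← String.ofList_append]
        simp
        exact hp
      · have hnat : (idx x).toNat ≠ p := by omega
        have hbeq : (idx x == (p : Int)) = false := by simp [hc]
        simp only [List.filter_cons, hbeq, if_neg Bool.false_ne_true]
        rw [List.getD_eq_getElem?_getD, List.getElem?_set_ne hnat, ← List.getD_eq_getElem?_getD]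

theorem pv_filter_range_singleton (M : Nat) (t : Int) :
    (List.range M).filter (fun (c : Nat) => ((c : Int) == t)) = if 0 ≤ t ∧ t < (M : Int) then [t.toNat] else [] := by
  induction M with
  | zero => simp
  | succ M ih =>
      rw [List.range_succ, List.filter_append, ih]
      simp only [List.filter_cons, List.filter_nil]
      by_cases hM : ((M : Nat) : Int) = t
      · have hb : (((M : Nat) : Int) == t) = true := by simpa using hM
        have h1 : ¬ (0 ≤ t ∧ t < (M : Int)) := by omega
        have h2 : 0 ≤ t ∧ t < ((M + 1 : Nat) : Int) := by push_cast; omega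
        have h3 : t.toNat = M := by omega
        simp [hb, h2, h3]
        rw [if_neg (show ¬ t < (M : Int) by omega), if_pos (show t ≤ (M : Int) by omega)]
        simp
      · have hb : (((M : Nat) : Int) == t) = false := by simpa using hM
        have h2 : (0 ≤ t ∧ t < ((M + 1 : Nat) : Int)) ↔ (0 ≤ t ∧ t < (M : Int)) := by
          push_cast; omega
        simp only [hb, Bool.false_eq_true, if_false, List.append_nil]
        rw [if_congr h2 rfl rfl]

theorem pv_flatMap_range_ite {α : Type} (N : Nat) (a b : Int) (g : Int → α) :
    (List.range N).flatMap (fun (r : Nat) => if a ≤ (r : Int) ∧ (r : Int) < b then [g (r : Int)] else [])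
    = (List.range (min (N : Int) b - max 0 a).toNat).map (fun (j : Nat) => g (max 0 a + (j : Int))) := by
  induction N with
  | zero =>
      simp
  | succ N ih =>
      rw [List.range_succ, List.flatMap_append, ih]
      by_cases hc : a ≤ (N : Int) ∧ (N : Int) < b
      · have hlen : (min ((N + 1 : Nat) : Int) b - max 0 a).toNat
            = (min (N : Int) b - max 0 a).toNat + 1 := by push_cast; omega
        rw [hlen, List.range_succ, List.map_append]
        simp only [List.flatMap_cons, List.flatMap_nil, if_pos hc, List.map_cons, List.map_nil,
          List.append_nil]
        have harg : max 0 a + ((min (N : Int) b - max 0 a).toNat : Int) = (N : Int) := by omega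
        rw [harg]
      · have hlen : (min ((N + 1 : Nat) : Int) b - max 0 a).toNat
            = (min (N : Int) b - max 0 a).toNat := by push_cast; omega
        rw [hlen]
        simp [hc]

set_option maxHeartbeats 1000000 in
theorem pv_nested_bucket (R C : List Int) (idx : Int → Int → Int) (g : Int → Int → Char)
    (bs : List String) (h : ∀ r ∈ R, ∀ c ∈ C, 0 ≤ idx r c ∧ idx r c < (bs.length : Int)) :
    R.foldl (fun b r => C.foldl (fun b c => PySem.List.pySetD b (idx r c)
        (PySem.List.pyGetD b (idx r c) "" ++ String.singleton (g r c))) b) bs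
    = (List.range bs.length).map (fun p => bs.getD p "" ++ String.ofList
        (((R.flatMap (fun r => C.map (fun c => (r, c)))).filter
          (fun rc => idx rc.1 rc.2 == (p : Int))).map (fun rc => g rc.1 rc.2))) := by
  have h1 : ∀ (r : Int) (b : List String),
      C.foldl (fun b c => PySem.List.pySetD b (idx r c)
        (PySem.List.pyGetD b (idx r c) "" ++ String.singleton (g r c))) b
      = (C.map (fun c => (r, c))).foldl (fun b rc => PySem.List.pySetD b (idx rc.1 rc.2)
        (PySem.List.pyGetD b (idx rc.1 rc.2) "" ++ String.singleton (g rc.1 rc.2))) b := by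
    intro r b
    rw [List.foldl_map]
  simp only [h1]
  have h3 := pv_bucket_foldl (R.flatMap (fun r => C.map (fun c => (r, c))))
      (fun rc => idx rc.1 rc.2) (fun rc => g rc.1 rc.2) bs (by
    intro rc hrc
    rw [List.mem_flatMap] at hrc
    obtain ⟨r, hr, hrc⟩ := hrc
    rw [List.mem_map] at hrc
    obtain ⟨c, hc, rfl⟩ := hrc
    exact h r hr c hc)
  rw [List.foldl_flatMap] at h3
  exact h3

theorem pv_diag1 (N M : Nat) (i : Int) (φ : Int → Int → Char) :
    (((List.range N).flatMap (fun (rn : Nat) => (List.range M).map (fun (cn : Nat) => ((rn : Int), (cn : Int))))).filter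
        (fun rc => (N : Int) - 1 - (rc.1 - rc.2) == i)).map (fun rc => φ rc.1 rc.2)
    = (List.range (min ((N : Int) - max 0 ((N : Int) - i - 1)) ((M : Int) - max (i - (N : Int) + 1) 0)).toNat).map
        (fun (j : Nat) => φ (max 0 ((N : Int) - i - 1) + (j : Int)) (max (i - (N : Int) + 1) 0 + (j : Int))) := by
  rw [List.filter_flatMap, List.map_flatMap]
  have hfun : (fun (rn : Nat) => ((((List.range M).map (fun (cn : Nat) => ((rn : Int), (cn : Int)))).filter
        (fun rc => (N : Int) - 1 - (rc.1 - rc.2) == i)).map (fun rc => φ rc.1 rc.2)))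
      = (fun (rn : Nat) => if (N : Int) - 1 - i ≤ (rn : Int) ∧ (rn : Int) < (M : Int) + (N : Int) - 1 - i
          then [φ (rn : Int) (i - (N : Int) + 1 + (rn : Int))] else []) := by
    funext rn
    rw [List.filter_map]
    have hpred : (fun (cn : Nat) => ((N : Int) - 1 - ((rn : Int) - (cn : Int)) == i))
        = (fun (cn : Nat) => ((cn : Int) == i - (N : Int) + 1 + (rn : Int))) := by
      funext cn
      exact beq_eq_beq.mpr (by omega)
    show (((List.range M).filter (fun (cn : Nat) => ((N : Int) - 1 - ((rn : Int) - (cn : Int)) == i))).map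
        (fun (cn : Nat) => ((rn : Int), (cn : Int)))).map (fun rc => φ rc.1 rc.2) = _
    rw [hpred, pv_filter_range_singleton]
    by_cases hc : 0 ≤ i - (N : Int) + 1 + (rn : Int) ∧ i - (N : Int) + 1 + (rn : Int) < (M : Int)
    · have hc' : (N : Int) - 1 - i ≤ (rn : Int) ∧ (rn : Int) < (M : Int) + (N : Int) - 1 - i := by omega
      have hcast : (((i - (N : Int) + 1 + (rn : Int)).toNat : Int)) = i - (N : Int) + 1 + (rn : Int) := by omega
      simp only [if_pos hc, if_pos hc', List.map_cons, List.map_nil, hcast]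
    · have hc' : ¬ ((N : Int) - 1 - i ≤ (rn : Int) ∧ (rn : Int) < (M : Int) + (N : Int) - 1 - i) := by omega
      simp only [if_neg hc, if_neg hc', List.map_nil]
  rw [hfun, pv_flatMap_range_ite N ((N : Int) - 1 - i) ((M : Int) + (N : Int) - 1 - i)
      (fun x => φ x (i - (N : Int) + 1 + x))]
  have hlen : (min ((N : Int)) ((M : Int) + (N : Int) - 1 - i) - max 0 ((N : Int) - 1 - i)).toNat
      = (min ((N : Int) - max 0 ((N : Int) - i - 1)) ((M : Int) - max (i - (N : Int) + 1) 0)).toNat := by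
    omega
  rw [hlen]
  apply List.map_congr_left
  intro j hj
  have h1 : max 0 ((N : Int) - 1 - i) + (j : Int) = max 0 ((N : Int) - i - 1) + (j : Int) := by omega
  have h2 : i - (N : Int) + 1 + (max 0 ((N : Int) - 1 - i) + (j : Int)) = max (i - (N : Int) + 1) 0 + (j : Int) := by omega
  rw [h1] at *
  rw [← h2]

theorem pv_diag2 (N M : Nat) (i : Int) (φ : Int → Int → Char) :
    (((List.range M).flatMap (fun (cn : Nat) => (List.range N).map (fun (rn : Nat) => ((cn : Int), (rn : Int))))).filter
        (fun rc => rc.2 + rc.1 == i)).map (fun rc => φ rc.2 rc.1)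
    = (List.range (min ((N : Int) - max 0 ((N : Int) - i - 1)) ((M : Int) - max (i - (N : Int) + 1) 0)).toNat).map
        (fun (j : Nat) => φ ((N : Int) - 1 - max 0 ((N : Int) - i - 1) - (j : Int)) (max (i - (N : Int) + 1) 0 + (j : Int))) := by
  rw [List.filter_flatMap, List.map_flatMap]
  have hfun : (fun (cn : Nat) => ((((List.range N).map (fun (rn : Nat) => ((cn : Int), (rn : Int)))).filter
        (fun rc => rc.2 + rc.1 == i)).map (fun rc => φ rc.2 rc.1)))
      = (fun (cn : Nat) => if i - (N : Int) + 1 ≤ (cn : Int) ∧ (cn : Int) < i + 1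
          then [φ (i - (cn : Int)) (cn : Int)] else []) := by
    funext cn
    rw [List.filter_map]
    have hpred : (fun (rn : Nat) => ((rn : Int) + (cn : Int) == i))
        = (fun (rn : Nat) => ((rn : Int) == i - (cn : Int))) := by
      funext rn
      exact beq_eq_beq.mpr (by omega)
    show (((List.range N).filter (fun (rn : Nat) => ((rn : Int) + (cn : Int) == i))).map
        (fun (rn : Nat) => ((cn : Int), (rn : Int)))).map (fun rc => φ rc.2 rc.1) = _
    rw [hpred, pv_filter_range_singleton]
    by_cases hc : 0 ≤ i - (cn : Int) ∧ i - (cn : Int) < (N : Int)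
    · have hc' : i - (N : Int) + 1 ≤ (cn : Int) ∧ (cn : Int) < i + 1 := by omega
      have hcast : (((i - (cn : Int)).toNat : Int)) = i - (cn : Int) := by omega
      simp only [if_pos hc, if_pos hc', List.map_cons, List.map_nil, hcast]
    · have hc' : ¬ (i - (N : Int) + 1 ≤ (cn : Int) ∧ (cn : Int) < i + 1) := by omega
      simp only [if_neg hc, if_neg hc', List.map_nil]
  rw [hfun, pv_flatMap_range_ite M (i - (N : Int) + 1) (i + 1) (fun x => φ (i - x) x)]
  have hlen : (min ((M : Int)) (i + 1) - max 0 (i - (N : Int) + 1)).toNat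
      = (min ((N : Int) - max 0 ((N : Int) - i - 1)) ((M : Int) - max (i - (N : Int) + 1) 0)).toNat := by
    omega
  rw [hlen]
  apply List.map_congr_left
  intro j hj
  rw [List.mem_range] at hj
  have h2 : max 0 (i - (N : Int) + 1) + (j : Int) = max (i - (N : Int) + 1) 0 + (j : Int) := by omega
  rw [h2]
  have h1 : i - (max (i - (N : Int) + 1) 0 + (j : Int)) = (N : Int) - 1 - max 0 ((N : Int) - i - 1) - (j : Int) := by
    omega
  rw [h1]

theorem pv_main (matrix : List String) (direction : Int) :
    transpose_diagonally matrix direction = transpose_diagonally_alt matrix direction := by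
  unfold transpose_diagonally transpose_diagonally_alt
  simp only [PySem.Str.len_eq]
  set N := matrix.length with hN
  set M := (PySem.List.pyGetD matrix 0 "").toList.length with hM
  have hbslen : (PySem.List.pyRepeat [""] ((N : Int) + (M : Int) - 1)).length
      = ((N : Int) + (M : Int) - 1).toNat := by
    rw [PySem.List.pyRepeat_singleton, List.length_replicate]
  by_cases hd : (direction == 1) = true
  · simp only [hd, if_true]
    rw [pv_nested_bucket (PySem.List.pyRange 0 (N : Int) 1) (PySem.List.pyRange 0 (M : Int) 1)
        (fun r c => ((N : Int) - 1) - (r - c)) (fun r c => pvCell matrix r c) _ (by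
      intro r hr c hc
      rw [PySem.List.mem_pyRange_one] at hr hc
      rw [hbslen]
      beta_reduce
      omega)]
    rw [PySem.List.foldl_append_singleton_eq_map]
    simp only [pv_stringFoldl, List.nil_append]
    simp only [PySem.List.pyRange_one, sub_zero, zero_add, Int.toNat_natCast, List.map_map,
      List.flatMap_map, Function.comp_def, PySem.List.pyRepeat_singleton, List.length_replicate]
    rw [show ((↑M + ↑N - 1 : Int)).toNat = ((↑N + ↑M - 1 : Int)).toNat from by omega]
    apply List.map_congr_left
    intro k hk
    rw [List.mem_range] at hk
    rw [List.getD_replicate "" hk, String.empty_append, String.empty_append]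
    exact congrArg String.ofList (pv_diag1 N M (↑k) (fun r c => pvCell matrix r c)).symm
  · simp only [hd, Bool.false_eq_true, if_false]
    rw [pv_nested_bucket (PySem.List.pyRange 0 (M : Int) 1) (PySem.List.pyRange 0 (N : Int) 1)
        (fun c r => r + c) (fun c r => pvCell matrix r c) _ (by
      intro c hc r hr
      rw [PySem.List.mem_pyRange_one] at hr hc
      rw [hbslen]
      beta_reduce
      omega)]
    rw [PySem.List.foldl_append_singleton_eq_map]
    simp only [pv_stringFoldl, List.nil_append]
    simp only [PySem.List.pyRange_one, sub_zero, zero_add, Int.toNat_natCast, List.map_map,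
      List.flatMap_map, Function.comp_def, PySem.List.pyRepeat_singleton, List.length_replicate]
    rw [show ((↑M + ↑N - 1 : Int)).toNat = ((↑N + ↑M - 1 : Int)).toNat from by omega]
    apply List.map_congr_left
    intro k hk
    rw [List.mem_range] at hk
    rw [List.getD_replicate "" hk, String.empty_append, String.empty_append]
    exact congrArg String.ofList (pv_diag2 N M (↑k) (fun r c => pvCell matrix r c)).symm

-- ===== VERDICT (by name: the statement is the Claim_ definition above) =====
theorem transpose_diagonally_spec : Claim_equal_transpose_diagonally := by
  intro matrix direction _ _
  unfold Spec_transpose_diagonally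
  exact pv_main matrix direction
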